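-- pv_equiv track=rewrite | github.com/abrose1/mcp-server-eia | src/mcp_server_eia/tools/projections.py | _prefer_projection
-- ===== SOURCE A (Python) =====
-- from typing import Any
--
-- def _prefer_projection(rows: list[dict[str, Any]]) -> list[dict[str, Any]]:
--     by_key: dict[tuple[Any, ...], dict[str, Any]] = {}
--     for row in rows:
--         key = (row.get("seriesId"), row.get("regionId"), row.get("period"))
--         prev = by_key.get(key)
--         if prev is None:
--             by_key[key] = row
--             continue
--         if prev.get("history") != "PROJECTION" and row.get("history") == "PROJECTION":
--             by_key[key] = row
--     return list(by_key.values())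
-- ===== SOURCE B (Python) =====
-- from typing import Any
--
-- def _prefer_projection(rows: list[dict[str, Any]]) -> list[dict[str, Any]]:
--     # Build an index of all rows per key, then select per group.
--     groups: dict[tuple[Any, ...], list[dict[str, Any]]] = {}
--     for row in rows:
--         key = (row.get("seriesId"), row.get("regionId"), row.get("period"))
--         groups.setdefault(key, []).append(row)
--     result: list[dict[str, Any]] = []
--     for group in groups.values():
--         chosen = next((r for r in group if r.get("history") == "PROJECTION"), group[0])
--         result.append(chosen)
--     return result
-- ===== Notes on version B (the rewrite author's own statement) =====
-- stated objective: alternative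
-- what changed: Replaced the single-pass conditional-replacement dict with a two-phase decomposition: first group all rows per (seriesId, regionId, period) key in encounter order, then select per group the first PROJECTION row or, failing that, the group's first row.
import Mathlib
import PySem

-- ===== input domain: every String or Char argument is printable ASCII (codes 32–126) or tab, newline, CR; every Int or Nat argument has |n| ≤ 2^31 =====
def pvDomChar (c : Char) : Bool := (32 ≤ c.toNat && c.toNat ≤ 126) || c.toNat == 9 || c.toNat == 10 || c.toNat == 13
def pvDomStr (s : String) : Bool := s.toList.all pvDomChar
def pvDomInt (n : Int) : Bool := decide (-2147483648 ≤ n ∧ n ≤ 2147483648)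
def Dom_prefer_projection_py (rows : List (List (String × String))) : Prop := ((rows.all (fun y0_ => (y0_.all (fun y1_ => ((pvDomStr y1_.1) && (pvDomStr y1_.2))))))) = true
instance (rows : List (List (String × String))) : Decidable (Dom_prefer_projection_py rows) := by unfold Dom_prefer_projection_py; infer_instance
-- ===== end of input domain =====

-- B replaces A's single-pass conditional-replacement dict with a group-then-select
-- two-phase decomposition (objective: alternative, same cost).

-- row.get(k) on the row dict (assoc list, first match)
def pvRowGet (row : List (String × String)) (k : String) : Option String :=
  (PySem.Dict.mk row).get? k

-- (row.get("seriesId"), row.get("regionId"), row.get("period"))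
def pvKey (row : List (String × String)) : Option String × Option String × Option String :=
  (pvRowGet row "seriesId", pvRowGet row "regionId", pvRowGet row "period")

-- ===== PORT A =====
-- loop body of A: keep first row per key, replace only by the first PROJECTION row
def pvStepA (by_key : PySem.Dict (Option String × Option String × Option String) (List (String × String)))
    (row : List (String × String)) :
    PySem.Dict (Option String × Option String × Option String) (List (String × String)) :=
  match by_key.get? (pvKey row) with
  | none => by_key.insert (pvKey row) row
  | some prev =>
      if pvRowGet prev "history" != some "PROJECTION" && pvRowGet row "history" == some "PROJECTION"
      then by_key.insert (pvKey row) row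
      else by_key

def prefer_projection_py (rows : List (List (String × String))) : List (List (String × String)) :=
  (rows.foldl pvStepA PySem.Dict.empty).values

-- ===== PORT B =====
-- loop body of B's first pass: groups.setdefault(key, []).append(row)
def pvStepB (groups : PySem.Dict (Option String × Option String × Option String) (List (List (String × String))))
    (row : List (String × String)) :
    PySem.Dict (Option String × Option String × Option String) (List (List (String × String))) :=
  groups.modify (pvKey row) [] (· ++ [row])

-- B's second pass per group: first PROJECTION row, else group[0]
def pvSelect (g : List (List (String × String))) : List (String × String) :=
  match g.find? (fun r => pvRowGet r "history" == some "PROJECTION") with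
  | some r => r
  | none => g.headD []

def prefer_projection_py_alt (rows : List (List (String × String))) : List (List (String × String)) :=
  ((rows.foldl pvStepB PySem.Dict.empty).values).map pvSelect

-- ===== PRECONDITION & SPEC =====
def Spec_prefer_projection_py (rows : List (List (String × String))) (out : List (List (String × String))) : Prop := out = prefer_projection_py_alt rows
instance (rows : List (List (String × String))) (out : List (List (String × String))) : Decidable (Spec_prefer_projection_py rows out) := by unfold Spec_prefer_projection_py; infer_instance

-- ===== CLAIM (what is proved, stated in full; the proofs are below) =====
def Claim_equal_prefer_projection_py : Prop := ∀ (rows : List (List (String × String))), Dom_prefer_projection_py rows → Spec_prefer_projection_py rows (prefer_projection_py rows)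

-- ===== LEMMAS AND PROOFS =====

lemma pvSelect_singleton (r : List (String × String)) : pvSelect [r] = r := by
  unfold pvSelect
  cases h : List.find? (fun r => pvRowGet r "history" == some "PROJECTION") [r] with
  | none => rfl
  | some x =>
      have hx := List.mem_of_find?_eq_some h
      simp at hx
      simp [hx]

lemma pvSelect_append (g : List (List (String × String))) (hg : g ≠ []) (row : List (String × String)) :
    pvSelect (g ++ [row]) =
      if pvRowGet (pvSelect g) "history" != some "PROJECTION" && pvRowGet row "history" == some "PROJECTION"
      then row else pvSelect g := by
  unfold pvSelect
  rw [List.find?_append]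
  cases hf : g.find? (fun r => pvRowGet r "history" == some "PROJECTION") with
  | some r =>
      have hr := List.find?_some hf
      simp at hr
      simp [Option.or, hr]
  | none =>
      have hnone := List.find?_eq_none.mp hf
      have hhead : g.headD [] ∈ g := by
        cases g with
        | nil => exact absurd rfl hg
        | cons a t => simp
      have hh := hnone _ hhead
      simp at hh
      simp only [Option.none_or]
      by_cases hrow : pvRowGet row "history" = some "PROJECTION"
      · simp [List.find?, hrow, hh]
      · have hfalse : (pvRowGet row "history" == some "PROJECTION") = false := by simp [hrow]
        simp [List.find?, hfalse]
        cases g with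
        | nil => exact absurd rfl hg
        | cons a t => simp

-- the invariant: A's dict and B's groups have the same keys, and A's value at each
-- key is pvSelect of B's (nonempty) group there
lemma pv_inv (rows : List (List (String × String)))
    (dA : PySem.Dict (Option String × Option String × Option String) (List (String × String)))
    (dB : PySem.Dict (Option String × Option String × Option String) (List (List (String × String))))
    (hkeys : dA.keys = dB.keys) (hnd : dA.keys.Nodup)
    (hval : ∀ k ∈ dA.keys, dB.getD k [] ≠ [] ∧ dA.getD k [] = pvSelect (dB.getD k [])) :
    (rows.foldl pvStepA dA).values = ((rows.foldl pvStepB dB).values).map pvSelect := by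
  induction rows generalizing dA dB with
  | nil =>
      simp only [List.foldl_nil]
      rw [PySem.Dict.values_eq_map_keys dA hnd [],
          PySem.Dict.values_eq_map_keys dB (hkeys ▸ hnd) [], ← hkeys, List.map_map]
      refine List.map_congr_left (fun k hk => ?_)
      simp only [Function.comp_apply]
      exact (hval k hk).2
  | cons row rest ih =>
      simp only [List.foldl_cons]
      by_cases hc : dA.contains (pvKey row) = true
      · -- key already present
        have hcB : dB.contains (pvKey row) = true := by
          rw [PySem.Dict.contains_iff_mem_keys] at hc ⊢; rwa [← hkeys]
        have hkmem : pvKey row ∈ dA.keys := (PySem.Dict.contains_iff_mem_keys _ _).mp hc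
        obtain ⟨hgne, hgsel⟩ := hval _ hkmem
        obtain ⟨prev, hprev⟩ : ∃ v, dA.get? (pvKey row) = some v := by
          cases h : dA.get? (pvKey row) with
          | none => rw [PySem.Dict.get?_eq_none_iff_contains] at h; simp [h] at hc
          | some v => exact ⟨v, rfl⟩
        have hprevD : dA.getD (pvKey row) [] = prev := PySem.Dict.getD_of_get?_eq_some _ _ hprev
        have hBkeys : (pvStepB dB row).keys = dB.keys := by
          unfold pvStepB
          rw [PySem.Dict.keys_modify, PySem.Dict.keys_insert_of_contains _ _ hcB]
        have hBself : (pvStepB dB row).getD (pvKey row) [] = dB.getD (pvKey row) [] ++ [row] :=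
          PySem.Dict.getD_modify_self dB (pvKey row) [] _
        unfold pvStepA
        rw [hprev]
        simp only
        have hsel : pvSelect ((pvStepB dB row).getD (pvKey row) []) =
            if pvRowGet prev "history" != some "PROJECTION" && pvRowGet row "history" == some "PROJECTION"
            then row else prev := by
          rw [hBself, pvSelect_append _ hgne, ← hgsel, hprevD]
        split
        · -- replace
          next hcond =>
            apply ih
            · rw [PySem.Dict.keys_insert_of_contains _ _ hc, hkeys, ← hBkeys]
            · rwa [PySem.Dict.keys_insert_of_contains _ _ hc]
            · intro k hk
              rw [PySem.Dict.keys_insert_of_contains _ _ hc] at hk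
              by_cases hkk : k = pvKey row
              · subst hkk
                refine ⟨by rw [hBself]; simp, ?_⟩
                rw [PySem.Dict.getD_insert_self, hsel, hcond]
                simp
              · rw [PySem.Dict.getD_insert_of_ne _ _ _ hkk]
                have h2 : (pvStepB dB row).getD k [] = dB.getD k [] :=
                  PySem.Dict.getD_modify_of_ne dB [] _ hkk
                rw [h2]
                exact hval k hk
        · -- keep
          next hcond =>
            apply ih
            · rw [hkeys, ← hBkeys]
            · exact hnd
            · intro k hk
              by_cases hkk : k = pvKey row
              · subst hkk
                refine ⟨by rw [hBself]; simp, ?_⟩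
                rw [hsel, hprevD]
                simp only [Bool.not_eq_true] at hcond
                rw [if_neg (by simp [hcond])]
              · have h2 : (pvStepB dB row).getD k [] = dB.getD k [] :=
                  PySem.Dict.getD_modify_of_ne dB [] _ hkk
                rw [h2]
                exact hval k hk
      · -- new key
        have hc' : dA.contains (pvKey row) = false := by simpa using hc
        have hcB : dB.contains (pvKey row) = false := by
          rw [← Bool.not_eq_true, PySem.Dict.contains_iff_mem_keys, ← hkeys,
              ← PySem.Dict.contains_iff_mem_keys]
          simp [hc']
        have hnone : dA.get? (pvKey row) = none :=
          (PySem.Dict.get?_eq_none_iff_contains dA (pvKey row)).mpr hc'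
        have hkNot : pvKey row ∉ dA.keys := by
          rw [← PySem.Dict.contains_iff_mem_keys]; simp [hc']
        have hBkeys : (pvStepB dB row).keys = dB.keys ++ [pvKey row] := by
          unfold pvStepB
          rw [PySem.Dict.keys_modify, PySem.Dict.keys_insert_of_not_contains _ _ hcB]
        have hBself : (pvStepB dB row).getD (pvKey row) [] = [row] := by
          have := PySem.Dict.getD_modify_self dB (pvKey row) [] (· ++ [row])
          rwa [PySem.Dict.getD_of_not_contains _ _ hcB, List.nil_append] at this
        unfold pvStepA
        rw [hnone]
        simp only
        apply ih
        · rw [PySem.Dict.keys_insert_of_not_contains _ _ hc', hkeys, ← hBkeys]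
        · rw [PySem.Dict.keys_insert_of_not_contains _ _ hc']
          simp [List.nodup_append, hnd]
          intro a b c h heq
          exact hkNot (heq ▸ h)
        · intro k hk
          rw [PySem.Dict.keys_insert_of_not_contains _ _ hc'] at hk
          by_cases hkk : k = pvKey row
          · subst hkk
            refine ⟨by rw [hBself]; simp, ?_⟩
            rw [PySem.Dict.getD_insert_self, hBself, pvSelect_singleton]
          · have hk' : k ∈ dA.keys := by
              rcases List.mem_append.mp hk with h | h
              · exact h
              · simp at h; exact absurd h hkk
            rw [PySem.Dict.getD_insert_of_ne _ _ _ hkk]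
            have h2 : (pvStepB dB row).getD k [] = dB.getD k [] :=
              PySem.Dict.getD_modify_of_ne dB [] _ hkk
            rw [h2]
            exact hval k hk'

-- ===== VERDICT (by name: the statement is the Claim_ definition above) =====
theorem prefer_projection_py_spec : Claim_equal_prefer_projection_py := by
  intro rows _
  unfold Spec_prefer_projection_py prefer_projection_py prefer_projection_py_alt
  exact pv_inv rows PySem.Dict.empty PySem.Dict.empty (by simp) (by simp) (by simp)
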